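-- pv_equiv track=rewrite | github.com/paigeanderson25/Recipeasy | main3.py | narrowdownbyTime
-- ===== SOURCE A (Python) =====
-- def narrowdownbyTime(sortedtimelist, min, max):
--     narrowedtimesortedlist = []
--     for i in range(len(sortedtimelist)):
--
--         if (sortedtimelist[i][0] >= min):
--             narrowedtimesortedlist.append(sortedtimelist[i])
--         if (sortedtimelist[i][0] > max):
--             break
--     return narrowedtimesortedlist
-- ===== SOURCE B (Python) =====
-- def narrowdownbyTime(sortedtimelist, min, max):
--     # two-phase: locate the cut point (one past the first row whose head exceeds max,
--     # or the end), then filter that prefix by the lower bound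
--     cut = len(sortedtimelist)
--     for i, row in enumerate(sortedtimelist):
--         if row[0] > max:
--             cut = i + 1
--             break
--     return [row for row in sortedtimelist[:cut] if row[0] >= min]
-- ===== Notes on version B (the rewrite author's own statement) =====
-- stated objective: alternative
-- what changed: A interleaves collecting and break-checking in one indexed loop with an accumulator; B first computes the cut point (one past the first row whose head exceeds max) and then filters that prefix with a comprehension.
import Mathlib
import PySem

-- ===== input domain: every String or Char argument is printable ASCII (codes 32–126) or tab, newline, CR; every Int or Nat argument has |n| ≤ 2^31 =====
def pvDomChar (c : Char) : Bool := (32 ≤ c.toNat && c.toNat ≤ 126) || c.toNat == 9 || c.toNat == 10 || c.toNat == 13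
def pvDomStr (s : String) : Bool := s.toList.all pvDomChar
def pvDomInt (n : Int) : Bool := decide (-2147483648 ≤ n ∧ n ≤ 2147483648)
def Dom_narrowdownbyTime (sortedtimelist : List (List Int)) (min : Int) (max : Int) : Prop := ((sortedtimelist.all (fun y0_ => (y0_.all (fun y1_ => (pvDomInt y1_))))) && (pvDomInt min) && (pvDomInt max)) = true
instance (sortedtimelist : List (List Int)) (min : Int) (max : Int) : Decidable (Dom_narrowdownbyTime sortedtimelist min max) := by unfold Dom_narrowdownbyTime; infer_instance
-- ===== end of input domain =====

-- A scans once, appending rows with head ≥ min and breaking after a row with head > max;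
-- B instead computes the cut point first and then filters that prefix (objective: alternative decomposition, same cost).


-- ===== PORT A =====
-- A's loop over indices, carried as structural recursion over the remaining rows with the
-- accumulator 'acc' (= narrowedtimesortedlist); row[0] is headI (rows are nonempty under Pre_).
def narrowLoopA (mn mx : Int) : List (List Int) → List (List Int) → List (List Int)
  | acc, [] => acc
  | acc, r :: rest =>
    let acc' := if r.headI ≥ mn then acc ++ [r] else acc
    if r.headI > mx then acc' else narrowLoopA mn mx acc' rest

def narrowdownbyTime (sortedtimelist : List (List Int)) (min : Int) (max : Int) : List (List Int) :=
  narrowLoopA min max [] sortedtimelist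

-- ===== PORT B =====
-- B's first loop: one past the index of the first row whose head exceeds max, else the length.
def findCut (mx : Int) : List (List Int) → Nat
  | [] => 0
  | r :: rest => if r.headI > mx then 1 else findCut mx rest + 1

def narrowdownbyTime_alt (sortedtimelist : List (List Int)) (min : Int) (max : Int) : List (List Int) :=
  (sortedtimelist.take (findCut max sortedtimelist)).filter (fun r => decide (r.headI ≥ min))

-- ===== PRECONDITION & SPEC =====
-- Pre_ excludes exactly the inputs on which Python A raises IndexError: those with an empty
-- inner list that the scan reaches (i.e. an empty row all of whose predecessors have head ≤ max).
def Pre_narrowdownbyTime (sortedtimelist : List (List Int)) (min : Int) (max : Int) : Prop :=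
  ∀ i, i < sortedtimelist.length →
    (∀ j, j < i → (sortedtimelist.getD j []).headI ≤ max) → sortedtimelist.getD i [] ≠ []
instance (sortedtimelist : List (List Int)) (min : Int) (max : Int) : Decidable (Pre_narrowdownbyTime sortedtimelist min max) := by unfold Pre_narrowdownbyTime; infer_instance

def pvWitness_narrowdownbyTime : List (List Int) × Int × Int := ([[1, 7], [2], [5]], 1, 3)

def Spec_narrowdownbyTime (sortedtimelist : List (List Int)) (min : Int) (max : Int) (out : List (List Int)) : Prop := out = narrowdownbyTime_alt sortedtimelist min max
instance (sortedtimelist : List (List Int)) (min : Int) (max : Int) (out : List (List Int)) : Decidable (Spec_narrowdownbyTime sortedtimelist min max out) := by unfold Spec_narrowdownbyTime; infer_instance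

-- ===== CLAIM (what is proved, stated in full; the proofs are below) =====
def Claim_equal_narrowdownbyTime : Prop := ∀ (sortedtimelist : List (List Int)) (min : Int) (max : Int), Dom_narrowdownbyTime sortedtimelist min max → Pre_narrowdownbyTime sortedtimelist min max → Spec_narrowdownbyTime sortedtimelist min max (narrowdownbyTime sortedtimelist min max)

-- ===== LEMMAS AND PROOFS =====
-- The loop of A with accumulator acc equals acc ++ (B's prefix-then-filter result).
lemma narrowLoopA_eq (mn mx : Int) (l : List (List Int)) :
    ∀ acc, narrowLoopA mn mx acc l
      = acc ++ (l.take (findCut mx l)).filter (fun r => decide (r.headI ≥ mn)) := by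
  induction l with
  | nil => intro acc; simp [narrowLoopA]
  | cons r rest ih =>
    intro acc
    by_cases hmx : r.headI > mx
    · by_cases hmn : r.headI ≥ mn <;>
        simp [narrowLoopA, findCut, hmx, hmn, List.filter]
    · by_cases hmn : r.headI ≥ mn <;>
        simp [narrowLoopA, findCut, hmx, hmn, List.filter, ih]

-- ===== VERDICT (by name: the statement is the Claim_ definition above) =====
theorem narrowdownbyTime_spec : Claim_equal_narrowdownbyTime := by
  intro l mn mx _ _
  unfold Spec_narrowdownbyTime narrowdownbyTime narrowdownbyTime_alt
  simpa using narrowLoopA_eq mn mx l []
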